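-- pv_equiv track=rewrite | github.com/kimsungmin1011/Algorithm | 프로그래머스/2/42888. 오픈채팅방/오픈채팅방.py | solution
-- ===== SOURCE A (Python) =====
-- def solution(record):
--     answer = []
--     user = {}
--
--     for i in record:
--         i = list(i.split(" "))
--         if i[0] == "Enter":
--             user[i[1]] = i[2]
--         elif i[0] == "Change":
--             user[i[1]] = i[2]
--
--     for i in record:
--         i = list(i.split(" "))
--         if i[0] == "Enter":
--             answer.append(f"{user[i[1]]}님이 들어왔습니다.")
--         elif i[0] == "Leave":
--             answer.append(f"{user[i[1]]}님이 나갔습니다.")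
--
--     return answer
-- ===== SOURCE B (Python) =====
-- def solution(record):
--     # No dictionary: each event's displayed nickname is found by scanning
--     # record backwards for the last "Enter"/"Change" line of that uid.
--     def final_name(uid):
--         for line in reversed(record):
--             p = line.split(" ")
--             if (p[0] == "Enter" or p[0] == "Change") and p[1] == uid:
--                 return p[2]
--         raise KeyError(uid)
--
--     out = []
--     for line in record:
--         p = line.split(" ")
--         if p[0] == "Enter":
--             out.append(final_name(p[1]) + "님이 들어왔습니다.")
--         elif p[0] == "Leave":
--             out.append(final_name(p[1]) + "님이 나갔습니다.")
--     return out
-- ===== Notes on version B (the rewrite author's own statement) =====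
-- stated objective: alternative
-- what changed: B drops A's precomputed nickname dictionary entirely: for each Enter/Leave event it finds the final nickname by scanning record backwards for the last Enter/Change line of that uid.
import Mathlib
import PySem

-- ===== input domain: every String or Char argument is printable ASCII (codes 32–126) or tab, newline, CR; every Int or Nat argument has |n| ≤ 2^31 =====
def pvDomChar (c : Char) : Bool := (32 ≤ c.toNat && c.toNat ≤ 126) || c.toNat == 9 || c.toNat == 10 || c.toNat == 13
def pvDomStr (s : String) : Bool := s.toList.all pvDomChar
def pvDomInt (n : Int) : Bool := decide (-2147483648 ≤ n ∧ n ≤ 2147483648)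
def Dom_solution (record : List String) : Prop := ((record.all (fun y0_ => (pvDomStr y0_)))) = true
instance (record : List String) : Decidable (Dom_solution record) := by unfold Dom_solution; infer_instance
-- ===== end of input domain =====

-- B removes A's nickname dictionary: each event's final nickname is found by a
-- backward scan of record for the last Enter/Change line of that uid (alternative
-- decomposition, not claimed faster).

-- shared trivial helpers: i.split(" ") and i[k] (defaulted; Pre_ guarantees in range)
def pvTok (line : String) : List String := (PySem.Str.split? line " ").getD []
def pvAt (t : List String) (k : Nat) : String := (PySem.List.pyGet? t (k : Int)).getD ""

-- ===== PORT A =====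
def pvStepUserA (user : PySem.Dict String String) (line : String) : PySem.Dict String String :=
  let i := pvTok line
  if pvAt i 0 = "Enter" then user.insert (pvAt i 1) (pvAt i 2)
  else if pvAt i 0 = "Change" then user.insert (pvAt i 1) (pvAt i 2)
  else user

def pvStepAnsA (user : PySem.Dict String String) (answer : List String) (line : String) : List String :=
  let i := pvTok line
  if pvAt i 0 = "Enter" then answer ++ [(user.get? (pvAt i 1)).getD "" ++ "님이 들어왔습니다."]
  else if pvAt i 0 = "Leave" then answer ++ [(user.get? (pvAt i 1)).getD "" ++ "님이 나갔습니다."]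
  else answer

def solution (record : List String) : List String :=
  let user := record.foldl pvStepUserA PySem.Dict.empty
  record.foldl (pvStepAnsA user) []

-- ===== PORT B =====
-- final_name(uid): scan the reversed record for the last Enter/Change of uid
-- (none = Python's KeyError; excluded by Pre_)
def pvScanBack (uid : String) : List String → Option String
  | [] => none
  | l :: rest =>
    let p := pvTok l
    if (pvAt p 0 = "Enter" ∨ pvAt p 0 = "Change") ∧ pvAt p 1 = uid then some (pvAt p 2)
    else pvScanBack uid rest

def pvStepOutB (record : List String) (out : List String) (line : String) : List String :=
  let p := pvTok line
  if pvAt p 0 = "Enter" then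
    out ++ [(pvScanBack (pvAt p 1) record.reverse).getD "" ++ "님이 들어왔습니다."]
  else if pvAt p 0 = "Leave" then
    out ++ [(pvScanBack (pvAt p 1) record.reverse).getD "" ++ "님이 나갔습니다."]
  else out

def solution_alt (record : List String) : List String :=
  record.foldl (pvStepOutB record) []

-- ===== PRECONDITION & SPEC =====
-- Pre_ excludes exactly the inputs on which Python A raises: an "Enter"/"Change" line with
-- fewer than 3 tokens (IndexError), a "Leave" line with fewer than 2 tokens (IndexError),
-- and a "Leave" of a uid that no "Enter"/"Change" line ever names (KeyError).
def Pre_solution (record : List String) : Prop :=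
  ∀ line ∈ record,
    ((pvAt (pvTok line) 0 = "Enter" ∨ pvAt (pvTok line) 0 = "Change") → 3 ≤ (pvTok line).length) ∧
    (pvAt (pvTok line) 0 = "Leave" →
      2 ≤ (pvTok line).length ∧
      ∃ l2 ∈ record,
        (pvAt (pvTok l2) 0 = "Enter" ∨ pvAt (pvTok l2) 0 = "Change") ∧
        pvAt (pvTok l2) 1 = pvAt (pvTok line) 1)
instance (record : List String) : Decidable (Pre_solution record) := by
  unfold Pre_solution; infer_instance

def pvWitness_solution : List String := ["Enter u1 muzi", "Enter u2 neo", "Leave u1", "Change u2 ryan"]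

def Spec_solution (record : List String) (out : List String) : Prop := out = solution_alt record
instance (record : List String) (out : List String) : Decidable (Spec_solution record out) := by unfold Spec_solution; infer_instance

-- ===== CLAIM (what is proved, stated in full; the proofs are below) =====
def Claim_equal_solution : Prop := ∀ (record : List String), Dom_solution record → Pre_solution record → Spec_solution record (solution record)

-- ===== LEMMAS AND PROOFS =====

theorem pvScanBack_append (uid : String) (a b : List String) :
    pvScanBack uid (a ++ b) = (pvScanBack uid a).or (pvScanBack uid b) := by
  induction a with
  | nil => simp [pvScanBack]
  | cons l ls ih =>
    simp only [List.cons_append, pvScanBack, ih]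
    split_ifs <;> simp

-- one A-step of the dict, read back, is a one-line backward scan over the rest
theorem pvStepUserA_get? (d : PySem.Dict String String) (l : String) (uid : String) :
    (pvStepUserA d l).get? uid = (pvScanBack uid [l]).or (d.get? uid) := by
  unfold pvStepUserA pvScanBack
  by_cases h1 : pvAt (pvTok l) 0 = "Enter" <;>
    by_cases h2 : pvAt (pvTok l) 0 = "Change" <;>
      by_cases h3 : pvAt (pvTok l) 1 = uid <;>
        simp_all [PySem.Dict.get?_insert, pvScanBack, eq_comm]

-- A's whole dict-building fold, read back at uid, is B's backward scan
theorem pvFoldUser_get? (record : List String) (d : PySem.Dict String String) (uid : String) :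
    (record.foldl pvStepUserA d).get? uid = (pvScanBack uid record.reverse).or (d.get? uid) := by
  induction record generalizing d with
  | nil => simp [pvScanBack]
  | cons l ls ih =>
    simp only [List.foldl, List.reverse_cons, ih, pvScanBack_append, pvStepUserA_get?,
      Option.or_assoc]

theorem pvStepAnsA_eq_stepOutB (record : List String) (out : List String) (line : String) :
    pvStepAnsA (record.foldl pvStepUserA PySem.Dict.empty) out line = pvStepOutB record out line := by
  unfold pvStepAnsA pvStepOutB
  simp [pvFoldUser_get?]

theorem pv_solution_eq (record : List String) : solution record = solution_alt record := by
  show record.foldl (pvStepAnsA (record.foldl pvStepUserA PySem.Dict.empty)) [] =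
    record.foldl (pvStepOutB record) []
  have h : pvStepAnsA (record.foldl pvStepUserA PySem.Dict.empty) = pvStepOutB record :=
    funext fun out => funext fun line => pvStepAnsA_eq_stepOutB record out line
  rw [h]

-- ===== VERDICT (by name: the statement is the Claim_ definition above) =====
theorem solution_spec : Claim_equal_solution := by
  intro record _ _
  unfold Spec_solution
  exact pv_solution_eq record
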